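-- pv_equiv track=rewrite | github.com/nahowo/Algorithm-study | 프로그래머스/2/150369. 택배 배달과 수거하기/택배 배달과 수거하기.py | solution
-- ===== SOURCE A (Python) =====
-- def solution(cap, n, deliveries, pickups):
--     answer = 0
--     dsum = 0
--     psum = 0
--
--     for i in range(n - 1, -1, -1):
--         cnt = 0
--         dsum += deliveries[i]
--         psum += pickups[i]
--
--         while dsum > 0 or psum > 0:
--             dsum -= cap
--             psum -= cap
--             cnt += 1
--         answer += (i + 1) * 2 * cnt
--
--     return answer
-- ===== SOURCE B (Python) =====
-- def solution(cap, n, deliveries, pickups):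
--     # inner counting loop replaced by ceiling-division arithmetic (same cost in practice, no inner loop)
--     answer = 0
--     d = p = 0
--     for i in range(n - 1, -1, -1):
--         d += deliveries[i]
--         p += pickups[i]
--         trips = max(-(-d // cap), -(-p // cap), 0)
--         answer += (i + 1) * 2 * trips
--         d -= trips * cap
--         p -= trips * cap
--     return answer
-- ===== Notes on version B (the rewrite author's own statement) =====
-- stated objective: alternative
-- what changed: The inner while-loop that counts trips by repeated subtraction of cap is replaced by a closed-form ceiling-division formula trips = max(ceil(d/cap), ceil(p/cap), 0), so the inner loop disappears.
-- outside the precondition, e.g. on solution(0, 1, [0], [0]): A returns 0, B raises ZeroDivisionError; on solution(-3, 1, [-1], [-1]): A returns 0, B returns 2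
import Mathlib
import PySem

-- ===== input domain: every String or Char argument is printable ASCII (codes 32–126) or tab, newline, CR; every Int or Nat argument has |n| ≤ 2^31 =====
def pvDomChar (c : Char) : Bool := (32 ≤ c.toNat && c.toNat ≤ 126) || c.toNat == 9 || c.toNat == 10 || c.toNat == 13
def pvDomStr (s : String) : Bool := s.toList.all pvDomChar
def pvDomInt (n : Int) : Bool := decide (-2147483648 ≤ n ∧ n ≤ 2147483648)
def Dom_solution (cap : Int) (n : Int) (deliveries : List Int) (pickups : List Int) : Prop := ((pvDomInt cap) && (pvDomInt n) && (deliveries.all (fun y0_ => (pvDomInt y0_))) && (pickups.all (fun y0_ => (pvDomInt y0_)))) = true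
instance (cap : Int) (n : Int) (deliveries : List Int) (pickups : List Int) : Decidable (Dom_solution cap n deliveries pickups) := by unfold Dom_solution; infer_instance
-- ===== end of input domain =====

-- B replaces A's inner trip-counting while-loop by a closed-form ceiling-division formula (no inner loop).

-- ===== PORT A =====
-- the inner `while dsum > 0 or psum > 0: dsum -= cap; psum -= cap; cnt += 1` loop;
-- the `0 < cap` test is only a totality guard: for cap ≤ 0 (outside Pre_) Python diverges here.
def pyWhile (cap dsum psum cnt : Int) : Int × Int × Int :=
  if 0 < dsum ∨ 0 < psum then
    if 0 < cap then pyWhile cap (dsum - cap) (psum - cap) (cnt + 1)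
    else (dsum, psum, cnt)
  else (dsum, psum, cnt)
termination_by (max dsum psum).toNat
decreasing_by
  rename_i h hc
  have h1 : max (dsum - cap) (psum - cap) = max dsum psum - cap := max_sub_sub_right dsum psum cap
  have h2 : 0 < max dsum psum := by
    rcases h with h | h
    · exact lt_max_of_lt_left h
    · exact lt_max_of_lt_right h
  omega

-- one iteration of A's `for i in range(n-1, -1, -1)` loop over the state (answer, dsum, psum)
def solAStep (cap : Int) (deliveries pickups : List Int) (s : Int × Int × Int) (i : Int) : Int × Int × Int :=
  let dsum := s.2.1 + PySem.List.pyGetD deliveries i 0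
  let psum := s.2.2 + PySem.List.pyGetD pickups i 0
  let r := pyWhile cap dsum psum 0
  (s.1 + (i + 1) * 2 * r.2.2, r.1, r.2.1)

def solution (cap : Int) (n : Int) (deliveries : List Int) (pickups : List Int) : Int :=
  ((PySem.List.pyRange (n - 1) (-1) (-1)).foldl (solAStep cap deliveries pickups) (0, 0, 0)).1

-- ===== PORT B =====
-- ceilDiv x cap = -(-x // cap), Python ceiling division
def ceilDiv (x cap : Int) : Int := -(PySem.Int.floordiv (-x) cap)

-- one iteration of B's loop over the state (answer, d, p)
def solBStep (cap : Int) (deliveries pickups : List Int) (s : Int × Int × Int) (i : Int) : Int × Int × Int :=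
  let d := s.2.1 + PySem.List.pyGetD deliveries i 0
  let p := s.2.2 + PySem.List.pyGetD pickups i 0
  let trips := max (max (ceilDiv d cap) (ceilDiv p cap)) 0
  (s.1 + (i + 1) * 2 * trips, d - trips * cap, p - trips * cap)

def solution_alt (cap : Int) (n : Int) (deliveries : List Int) (pickups : List Int) : Int :=
  ((PySem.List.pyRange (n - 1) (-1) (-1)).foldl (solBStep cap deliveries pickups) (0, 0, 0)).1

-- ===== PRECONDITION & SPEC =====
-- Pre_ excludes cap ≤ 0, where A diverges on any positive running demand (and only returns the
-- accidental value 0 when every suffix sum is nonpositive, while B's ceiling division by a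
-- nonpositive cap raises or misbehaves), and n exceeding a list length, where A raises IndexError.
def Pre_solution (cap : Int) (n : Int) (deliveries : List Int) (pickups : List Int) : Prop :=
  0 < cap ∧ n ≤ (deliveries.length : Int) ∧ n ≤ (pickups.length : Int)
instance (cap : Int) (n : Int) (deliveries : List Int) (pickups : List Int) : Decidable (Pre_solution cap n deliveries pickups) := by unfold Pre_solution; infer_instance

def pvWitness_solution : Int × Int × List Int × List Int := (4, 2, [1, 0], [0, 3])

def Spec_solution (cap : Int) (n : Int) (deliveries : List Int) (pickups : List Int) (out : Int) : Prop := out = solution_alt cap n deliveries pickups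
instance (cap : Int) (n : Int) (deliveries : List Int) (pickups : List Int) (out : Int) : Decidable (Spec_solution cap n deliveries pickups out) := by unfold Spec_solution; infer_instance

-- ===== CLAIM (what is proved, stated in full; the proofs are below) =====
def Claim_equal_solution : Prop := ∀ (cap : Int) (n : Int) (deliveries : List Int) (pickups : List Int), Dom_solution cap n deliveries pickups → Pre_solution cap n deliveries pickups → Spec_solution cap n deliveries pickups (solution cap n deliveries pickups)

-- ===== LEMMAS AND PROOFS =====

lemma ceilDiv_bracket (x cap : Int) (hc : 0 < cap) :
    (ceilDiv x cap - 1) * cap < x ∧ x ≤ ceilDiv x cap * cap :=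
  (PySem.Int.neg_floordiv_neg_eq_iff_of_pos hc).mp rfl

lemma ceilDiv_pos (x cap : Int) (hc : 0 < cap) (hx : 0 < x) : 1 ≤ ceilDiv x cap := by
  have h := ceilDiv_bracket x cap hc
  nlinarith [h.2]

lemma ceilDiv_nonpos (x cap : Int) (hc : 0 < cap) (hx : x ≤ 0) : ceilDiv x cap ≤ 0 := by
  have h := ceilDiv_bracket x cap hc
  nlinarith [h.1]

lemma ceilDiv_sub (x cap : Int) (hc : 0 < cap) : ceilDiv (x - cap) cap = ceilDiv x cap - 1 := by
  have h := ceilDiv_bracket x cap hc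
  rw [ceilDiv, PySem.Int.neg_floordiv_neg_eq_iff_of_pos hc]
  constructor <;> nlinarith [h.1, h.2]

-- characterization of A's inner loop by B's closed form
lemma pyWhile_eq (cap : Int) (hc : 0 < cap) : ∀ (d p c : Int),
    pyWhile cap d p c =
      (d - max (max (ceilDiv d cap) (ceilDiv p cap)) 0 * cap,
       p - max (max (ceilDiv d cap) (ceilDiv p cap)) 0 * cap,
       c + max (max (ceilDiv d cap) (ceilDiv p cap)) 0) := by
  intro d p c
  induction d, p, c using pyWhile.induct cap with
  | case1 d p c h _ ih =>
    have hd := ceilDiv_sub d cap hc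
    have hp := ceilDiv_sub p cap hc
    have h1 : 1 ≤ max (ceilDiv d cap) (ceilDiv p cap) := by
      rcases h with h | h
      · exact le_max_of_le_left (ceilDiv_pos d cap hc h)
      · exact le_max_of_le_right (ceilDiv_pos p cap hc h)
    have hT : max (max (ceilDiv d cap) (ceilDiv p cap)) 0
        = max (max (ceilDiv (d - cap) cap) (ceilDiv (p - cap) cap)) 0 + 1 := by
      rw [hd, hp]; omega
    rw [pyWhile, if_pos h, if_pos hc, ih, hT]
    refine Prod.ext ?_ (Prod.ext ?_ ?_) <;> simp <;> ring
  | case2 d p c h hc' =>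
    exact absurd hc hc'
  | case3 d p c h =>
    push Not at h
    have hd := ceilDiv_nonpos d cap hc h.1
    have hp := ceilDiv_nonpos p cap hc h.2
    have hT : max (max (ceilDiv d cap) (ceilDiv p cap)) 0 = 0 := by omega
    rw [pyWhile, if_neg (by push Not; exact h), hT]
    simp

lemma step_eq (cap : Int) (deliveries pickups : List Int) (hc : 0 < cap) :
    solAStep cap deliveries pickups = solBStep cap deliveries pickups := by
  funext s i
  simp only [solAStep, solBStep, pyWhile_eq cap hc]
  ring_nf

-- ===== VERDICT (by name: the statement is the Claim_ definition above) =====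
theorem solution_spec : Claim_equal_solution := by
  intro cap n deliveries pickups _ hpre
  unfold Spec_solution solution solution_alt
  rw [step_eq cap deliveries pickups hpre.1]
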